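-- pv_equiv track=rewrite | github.com/hoj2atwit/Yapa-Bot-PY | formatter.py | organize_by_rarity
-- ===== SOURCE A (Python) =====
-- def organize_by_rarity(d):
--   sortedKeys = sorted(d)[::-1]
--   orgAr = []
--   changedItems = 0
--   for i in range(6):
--     for x in sortedKeys:
--       if d[x]["rarity"] == i:
--         orgAr.append(d[x])
--         changedItems += 1
--     if changedItems == len(d.keys()):
--       break
--   return orgAr[::-1]
-- ===== SOURCE B (Python) =====
-- def organize_by_rarity(d):
--   # One pass over the sorted keys into six rarity buckets, then emit buckets 5..0.
--   buckets = [[] for _ in range(6)]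
--   for k in sorted(d):
--     v = d[k]
--     r = v["rarity"]
--     if 0 <= r < 6:
--       buckets[r].append(v)
--   out = []
--   for i in range(5, -1, -1):
--     out.extend(buckets[i])
--   return out
-- ===== Notes on version B (the rewrite author's own statement) =====
-- stated objective: simpler
-- what changed: A rescans the reversed key list once per rarity 0..5 (with an early-break counter) and reverses the result; B makes a single pass over the ascending sorted keys into six buckets and concatenates them in descending rarity order, no counter and no reversals.
import Mathlib
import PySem

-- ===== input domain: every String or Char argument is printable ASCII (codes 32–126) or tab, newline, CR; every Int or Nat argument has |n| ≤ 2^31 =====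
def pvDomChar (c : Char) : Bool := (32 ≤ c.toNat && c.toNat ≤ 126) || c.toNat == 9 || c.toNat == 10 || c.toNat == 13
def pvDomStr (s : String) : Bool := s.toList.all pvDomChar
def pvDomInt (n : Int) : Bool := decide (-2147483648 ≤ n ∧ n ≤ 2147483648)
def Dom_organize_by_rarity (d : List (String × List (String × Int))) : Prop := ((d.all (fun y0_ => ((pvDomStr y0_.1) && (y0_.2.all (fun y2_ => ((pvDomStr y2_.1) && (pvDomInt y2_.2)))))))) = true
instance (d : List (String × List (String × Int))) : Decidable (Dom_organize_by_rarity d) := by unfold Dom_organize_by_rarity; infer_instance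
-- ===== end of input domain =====

-- B buckets by rarity in one pass instead of A's six rescans + counter + two reversals (same return value).

-- ===== PORT A =====
-- shared dict primitives: the distinct keys of d (insertion order), d[k], d[k]["rarity"]
def pvKeys (d : List (String × List (String × Int))) : List String :=
  PySem.Set.ofList (d.map Prod.fst)

def pvVal (d : List (String × List (String × Int))) (k : String) : List (String × Int) :=
  ((d.find? (fun p => p.1 == k)).map Prod.snd).getD []

def pvRar (d : List (String × List (String × Int))) (k : String) : Option Int :=
  ((pvVal d k).find? (fun p => p.1 == "rarity")).map Prod.snd

-- inner 'for x in sortedKeys: if d[x]["rarity"] == i: orgAr.append(d[x]); changedItems += 1'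
def pvAInner (d : List (String × List (String × Int))) (sortedKeys : List String) (i : Int)
    (st : List (List (String × Int)) × Int) : List (List (String × Int)) × Int :=
  sortedKeys.foldl (fun st x =>
    if pvRar d x = some i then (st.1 ++ [pvVal d x], st.2 + 1) else st) st

-- outer 'for i in range(6): … ; if changedItems == len(d.keys()): break'
def pvAOuter (d : List (String × List (String × Int))) (sortedKeys : List String) :
    List Int → List (List (String × Int)) → Int → List (List (String × Int))
  | [], orgAr, _ => orgAr
  | i :: rest, orgAr, changedItems =>
    let st := pvAInner d sortedKeys i (orgAr, changedItems)
    if st.2 = ((pvKeys d).length : Int) then st.1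
    else pvAOuter d sortedKeys rest st.1 st.2

def organize_by_rarity (d : List (String × List (String × Int))) : List (List (String × Int)) :=
  -- sortedKeys = sorted(d)[::-1]; range(6) = [0,1,2,3,4,5]; final 'return orgAr[::-1]'
  (pvAOuter d ((PySem.List.sorted (pvKeys d) (fun x => x) false).reverse) [0, 1, 2, 3, 4, 5] [] 0).reverse

-- ===== PORT B =====
-- 'for k in sorted(d): v = d[k]; r = v["rarity"]; if 0 <= r < 6: buckets[r].append(v)'
def pvBuckets (d : List (String × List (String × Int))) : List (List (List (String × Int))) :=
  (PySem.List.sorted (pvKeys d) (fun x => x) false).foldl (fun bs k =>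
    match pvRar d k with
    | some r => if 0 ≤ r ∧ r < 6 then bs.set r.toNat (bs.getD r.toNat [] ++ [pvVal d k]) else bs
    | none => bs)   -- unreachable under Pre_ (Python raises KeyError here)
    (List.replicate 6 [])

def organize_by_rarity_alt (d : List (String × List (String × Int))) : List (List (String × Int)) :=
  -- 'for i in range(5, -1, -1): out.extend(buckets[i])'
  [5, 4, 3, 2, 1, 0].foldl (fun out (i : Nat) => out ++ (pvBuckets d).getD i []) []

-- ===== PRECONDITION & SPEC =====
-- Pre_ excludes exactly the inputs on which Python raises KeyError: some value dict has no "rarity" key.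
def Pre_organize_by_rarity (d : List (String × List (String × Int))) : Prop :=
  ∀ p ∈ d, (p.2.find? (fun q => q.1 == "rarity")).isSome = true

instance (d : List (String × List (String × Int))) : Decidable (Pre_organize_by_rarity d) := by
  unfold Pre_organize_by_rarity; infer_instance

def pvWitness_organize_by_rarity : (List (String × List (String × Int))) :=
  [("a", [("rarity", 1)]), ("b", [("rarity", 5), ("x", 0)])]

def Spec_organize_by_rarity (d : List (String × List (String × Int))) (out : List (List (String × Int))) : Prop := out = organize_by_rarity_alt d
instance (d : List (String × List (String × Int))) (out : List (List (String × Int))) : Decidable (Spec_organize_by_rarity d out) := by unfold Spec_organize_by_rarity; infer_instance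

-- ===== CLAIM (what is proved, stated in full; the proofs are below) =====
def Claim_equal_organize_by_rarity : Prop := ∀ (d : List (String × List (String × Int))), Dom_organize_by_rarity d → Pre_organize_by_rarity d → Spec_organize_by_rarity d (organize_by_rarity d)

-- ===== LEMMAS AND PROOFS =====

-- the values (in key order ks) whose rarity is i
def pvG (d : List (String × List (String × Int))) (i : Int) (ks : List String) :
    List (List (String × Int)) :=
  (ks.filter (fun k => pvRar d k = some i)).map (pvVal d)

-- rarity of k lies in the set S of already-processed loop indices
def pvMemPred (d : List (String × List (String × Int))) (S : List Int) (k : String) : Bool :=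
  match pvRar d k with
  | some r => decide (r ∈ S)
  | none => false

theorem pvAInner_eq (d : List (String × List (String × Int))) (sk : List String) (i : Int) :
    ∀ (acc : List (List (String × Int))) (c : Int),
      pvAInner d sk i (acc, c) = (acc ++ pvG d i sk, c + ((pvG d i sk).length : Int)) := by
  induction sk with
  | nil => intro acc c; simp [pvAInner, pvG]
  | cons k sk ih =>
    intro acc c
    by_cases h : pvRar d k = some i
    · have hstep : pvAInner d (k :: sk) i (acc, c) = pvAInner d sk i (acc ++ [pvVal d k], c + 1) := by
        simp [pvAInner, h]
      rw [hstep, ih]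
      simp [pvG, h]
      omega
    · have hstep : pvAInner d (k :: sk) i (acc, c) = pvAInner d sk i (acc, c) := by
        simp [pvAInner, h]
      rw [hstep, ih]
      simp [pvG, h]

theorem pvFilter_len_add {α : Type} (l : List α) (p q : α → Bool)
    (h : ∀ x ∈ l, ¬(p x = true ∧ q x = true)) :
    (l.filter p).length + (l.filter q).length = (l.filter (fun x => p x || q x)).length := by
  induction l with
  | nil => simp
  | cons a l ih =>
    have ha := h a (by simp)
    have ih' := ih (fun x hx => h x (by simp [hx]))
    simp only [List.filter_cons]
    cases hp : p a <;> cases hq : q a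
    · simp; omega
    · simp; omega
    · simp; omega
    · exact absurd ⟨hp, hq⟩ ha

theorem pvMemPred_cons (d : List (String × List (String × Int))) (i : Int) (S : List Int)
    (k : String) :
    pvMemPred d (i :: S) k = (decide (pvRar d k = some i) || pvMemPred d S k) := by
  unfold pvMemPred
  cases h : pvRar d k with
  | none => simp
  | some r =>
    by_cases hr : r = i <;> simp [hr]

theorem pvAOuter_eq (d : List (String × List (String × Int))) (sk : List String)
    (hlen : (pvKeys d).length = sk.length) :
    ∀ (is S : List Int) (acc : List (List (String × Int))),
      (is ++ S).Nodup →
      pvAOuter d sk is acc ((sk.filter (pvMemPred d S)).length : Int)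
        = acc ++ (is.map (fun i => pvG d i sk)).flatten := by
  intro is
  induction is with
  | nil => intro S acc _; simp [pvAOuter]
  | cons i rest ih =>
    intro S acc hnd
    have hdisj : ∀ x ∈ sk, ¬((fun k => pvMemPred d S k) x = true ∧
        (fun k => decide (pvRar d k = some i)) x = true) := by
      intro x _ ⟨h1, h2⟩
      have hi : i ∉ S := by
        rw [List.cons_append] at hnd
        exact fun hiS => (List.nodup_cons.mp hnd).1 (List.mem_append.mpr (Or.inr hiS))
      simp at h2
      simp [pvMemPred, h2] at h1
      exact hi h1
    have hsum : (sk.filter (pvMemPred d S)).length + (sk.filter (fun k => decide (pvRar d k = some i))).length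
        = (sk.filter (pvMemPred d (i :: S))).length := by
      rw [pvFilter_len_add sk _ _ hdisj]
      congr 1
      apply List.filter_congr
      intro x _
      rw [pvMemPred_cons]
      exact (Bool.or_comm _ _)
    have hGlen : (pvG d i sk).length = (sk.filter (fun k => decide (pvRar d k = some i))).length := by
      simp [pvG]
    simp only [pvAOuter, pvAInner_eq]
    by_cases hbrk : (((sk.filter (pvMemPred d S)).length : Int) + ((pvG d i sk).length : Int)
        = ((pvKeys d).length : Int))
    · -- break: every key's rarity is among i :: S, so remaining groups are empty
      rw [if_pos hbrk]
      have hall : ∀ k ∈ sk, pvMemPred d (i :: S) k = true := by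
        have hnat : (sk.filter (pvMemPred d S)).length + (pvG d i sk).length = (pvKeys d).length := by
          exact_mod_cast hbrk
        have hfl : (sk.filter (pvMemPred d (i :: S))).length = sk.length := by
          omega
        intro k hk
        exact (List.length_filter_eq_length_iff.mp hfl) k hk
      have hrest : (rest.map (fun j => pvG d j sk)).flatten = [] := by
        simp only [List.flatten_eq_nil_iff, List.mem_map]
        rintro _ ⟨j, hj, rfl⟩
        have hnd' := List.nodup_cons.mp ((List.cons_append (as := rest)).symm ▸ hnd)
        have hji : j ≠ i ∧ j ∉ S := by
          refine ⟨fun hh => ?_, fun hjS => ?_⟩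
          · subst hh; exact hnd'.1 (List.mem_append.mpr (Or.inl hj))
          · exact (List.disjoint_of_nodup_append hnd'.2) hj hjS
        simp only [pvG, List.map_eq_nil_iff, List.filter_eq_nil_iff]
        intro k hk hkr
        have := hall k hk
        simp at hkr
        simp [pvMemPred, hkr] at this
        rcases this with h | h
        · exact hji.1 h
        · exact hji.2 h
      simp [hrest]
    · rw [if_neg hbrk]
      have hnd' : (rest ++ i :: S).Nodup := by
        have : (i :: rest ++ S).Perm (rest ++ i :: S) := by
          simpa using List.perm_middle.symm
        exact this.nodup hnd
      have := ih (i :: S) (acc ++ pvG d i sk) hnd'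
      rw [show ((sk.filter (pvMemPred d S)).length : Int) + ((pvG d i sk).length : Int)
            = ((sk.filter (pvMemPred d (i :: S))).length : Int) by omega] at *
      rw [this]
      simp

theorem pvG_cons (d : List (String × List (String × Int))) (i : Int) (k : String)
    (ks : List String) :
    pvG d i (k :: ks) = (if pvRar d k = some i then [pvVal d k] else []) ++ pvG d i ks := by
  by_cases h : pvRar d k = some i <;> simp [pvG, h]

theorem pvBuckets_fold (d : List (String × List (String × Int))) :
    ∀ (ks : List String) (b0 b1 b2 b3 b4 b5 : List (List (String × Int))),
      ks.foldl (fun bs k =>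
        match pvRar d k with
        | some r => if 0 ≤ r ∧ r < 6 then bs.set r.toNat (bs.getD r.toNat [] ++ [pvVal d k]) else bs
        | none => bs) [b0, b1, b2, b3, b4, b5]
      = [b0 ++ pvG d 0 ks, b1 ++ pvG d 1 ks, b2 ++ pvG d 2 ks,
         b3 ++ pvG d 3 ks, b4 ++ pvG d 4 ks, b5 ++ pvG d 5 ks] := by
  intro ks
  induction ks with
  | nil => intro b0 b1 b2 b3 b4 b5; simp [pvG]
  | cons k ks ih =>
    intro b0 b1 b2 b3 b4 b5
    simp only [List.foldl_cons]
    cases hr : pvRar d k with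
    | none => rw [ih]; simp [pvG_cons, hr]
    | some r =>
      by_cases hb : 0 ≤ r ∧ r < 6
      · obtain ⟨h0, h6⟩ := hb
        interval_cases r <;> · simp only [hr]; rw [if_pos (by norm_num)]; exact (ih _ _ _ _ _ _).trans (by simp [pvG_cons, hr])
      · simp only [hr]
        rw [if_neg hb, ih]
        have n0 : r ≠ 0 := by omega
        have n1 : r ≠ 1 := by omega
        have n2 : r ≠ 2 := by omega
        have n3 : r ≠ 3 := by omega
        have n4 : r ≠ 4 := by omega
        have n5 : r ≠ 5 := by omega
        simp [pvG_cons, hr, n0, n1, n2, n3, n4, n5]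

theorem pvG_reverse (d : List (String × List (String × Int))) (i : Int) (ks : List String) :
    pvG d i ks.reverse = (pvG d i ks).reverse := by
  simp [pvG, List.filter_reverse, List.map_reverse]

theorem pvFilter_memPred_nil (d : List (String × List (String × Int))) (sk : List String) :
    sk.filter (pvMemPred d []) = [] := by
  rw [List.filter_eq_nil_iff]
  intro k _
  unfold pvMemPred
  cases pvRar d k <;> simp

-- ===== VERDICT (by name: the statement is the Claim_ definition above) =====
theorem organize_by_rarity_spec : Claim_equal_organize_by_rarity := by
  intro d _ _
  unfold Spec_organize_by_rarity organize_by_rarity organize_by_rarity_alt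
  have hlen : (pvKeys d).length
      = ((PySem.List.sorted (pvKeys d) (fun x => x) false).reverse).length := by
    simp [PySem.List.length_sorted]
  have hA := pvAOuter_eq d ((PySem.List.sorted (pvKeys d) (fun x => x) false).reverse) hlen
      [0, 1, 2, 3, 4, 5] [] [] (by decide)
  rw [pvFilter_memPred_nil] at hA
  simp only [List.length_nil, Nat.cast_zero] at hA
  have hB : pvBuckets d
      = [pvG d 0 (PySem.List.sorted (pvKeys d) (fun x => x) false),
         pvG d 1 (PySem.List.sorted (pvKeys d) (fun x => x) false),
         pvG d 2 (PySem.List.sorted (pvKeys d) (fun x => x) false),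
         pvG d 3 (PySem.List.sorted (pvKeys d) (fun x => x) false),
         pvG d 4 (PySem.List.sorted (pvKeys d) (fun x => x) false),
         pvG d 5 (PySem.List.sorted (pvKeys d) (fun x => x) false)] := by
    unfold pvBuckets
    rw [show List.replicate 6 ([] : List (List (String × Int))) = [[], [], [], [], [], []] from rfl]
    rw [pvBuckets_fold]
    simp
  rw [hA, hB]
  simp [pvG_reverse, List.reverse_append]
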